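-- pv_equiv track=rewrite | github.com/pvtrov/algorithms-and-data-structures | exercises from course/colloquiums/2019_20/kol1/zad 1.py | count
-- ===== SOURCE A (Python) =====
-- def counting(result_array, count_array, index):
--     for i in range(10):
--         if count_array[i] == 1:
--             result_array[index][0] += 1
--         if count_array[i] > 1:
--             result_array[index][1] += 1
--     return result_array
--
-- def count(array, result_array):  # O(10n) ( w tym counting)
--     for i in range(len(array)):
--         result_array[i][2] += i
--         count_array = [0] * 10
--         while array[i] > 0:
--             count_array[(array[i] % 10)] += 1
--             array[i] = array[i] // 10
--         result_array = counting(result_array, count_array, i)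
--     return result_array
-- ===== SOURCE B (Python) =====
-- def count(array, result_array):
--     for i in range(len(array)):
--         result_array[i][2] += i
--         digits = []
--         while array[i] > 0:
--             digits.append(array[i] % 10)
--             array[i] = array[i] // 10
--         digits.sort()
--         once = 0
--         multiple = 0
--         runlen = 0
--         prev = None
--         for d in digits:
--             if d == prev:
--                 runlen += 1
--             else:
--                 if runlen == 1:
--                     once += 1
--                 elif runlen > 1:
--                     multiple += 1
--                 runlen = 1
--                 prev = d
--         if runlen == 1:
--             once += 1
--         elif runlen > 1:
--             multiple += 1
--         result_array[i][0] += once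
--         result_array[i][1] += multiple
--     return result_array
-- ===== Notes on version B (the rewrite author's own statement) =====
-- stated objective: alternative
-- what changed: Replaces A's 10-slot frequency array plus the separate range(10) scanning helper with a sort-then-scan algorithm: the extracted digits are collected into a list, sorted, and a single run-length scan over the sorted list counts runs of length one vs longer runs.
import Mathlib
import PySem

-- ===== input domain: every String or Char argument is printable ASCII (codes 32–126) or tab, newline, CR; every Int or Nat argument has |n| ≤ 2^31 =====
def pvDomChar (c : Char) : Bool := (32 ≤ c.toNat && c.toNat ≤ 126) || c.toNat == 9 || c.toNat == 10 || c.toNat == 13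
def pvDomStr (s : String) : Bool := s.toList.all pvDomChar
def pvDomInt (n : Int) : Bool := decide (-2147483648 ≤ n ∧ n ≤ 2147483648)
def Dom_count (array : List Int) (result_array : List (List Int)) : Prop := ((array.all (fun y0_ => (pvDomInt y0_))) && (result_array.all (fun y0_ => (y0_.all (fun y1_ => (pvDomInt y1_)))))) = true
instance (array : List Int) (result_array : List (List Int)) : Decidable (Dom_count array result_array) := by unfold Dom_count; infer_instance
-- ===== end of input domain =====

-- B replaces A's 10-slot frequency array + range(10) scan by sort-then-run-scan over the digit list;
-- both Pythons mutate array and result_array in place identically, the theorems are about the return value.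

-- shared helper: 'result_array[i][j] += δ' (indices in range under Pre_count)
def bump (res : List (List Int)) (i j : Nat) (δ : Int) : List (List Int) :=
  res.set i ((res.getD i []).set j ((res.getD i []).getD j 0 + δ))

-- ===== PORT A =====
-- helper 'counting': for i in range(10): two conditional increments of row 'index'
def counting (result_array : List (List Int)) (count_array : List Int) (index : Nat) : List (List Int) :=
  (List.range 10).foldl (fun res i =>
    let res := if count_array.getD i 0 == 1 then bump res index 0 1 else res
    if count_array.getD i 0 > 1 then bump res index 1 1 else res) result_array

-- while array[i] > 0: count_array[array[i] % 10] += 1; array[i] //= 10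
-- (fuel = n.toNat + 1 only makes the loop total; it never runs out, since n // 10 shrinks)
def digitsA : Nat → Int → List Int → List Int
  | 0, _, ca => ca
  | fuel + 1, n, ca =>
    if n > 0 then
      digitsA fuel (PySem.Int.floordiv n 10)
        (ca.set (PySem.Int.mod n 10).toNat (ca.getD (PySem.Int.mod n 10).toNat 0 + 1))
    else ca

def count (array : List Int) (result_array : List (List Int)) : List (List Int) :=
  (List.range array.length).foldl (fun res i =>
    counting (bump res i 2 (i : Int))
      (digitsA ((array.getD i 0).toNat + 1) (array.getD i 0) (List.replicate 10 0)) i)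
    result_array

-- ===== PORT B =====
-- while array[i] > 0: digits.append(array[i] % 10); array[i] //= 10  (same fuel guard as digitsA; never exhausted)
def digitsList : Nat → Int → List Int → List Int
  | 0, _, acc => acc
  | fuel + 1, n, acc =>
    if n > 0 then
      digitsList fuel (PySem.Int.floordiv n 10) (acc ++ [PySem.Int.mod n 10])
    else acc

-- 'if runlen == 1: once += 1 elif runlen > 1: multiple += 1'
def flushB (o m r : Int) : Int × Int :=
  if r == 1 then (o + 1, m) else if r > 1 then (o, m + 1) else (o, m)

-- loop body of the run scan; state = (once, multiple, runlen, prev)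
def stepB (s : Int × Int × Int × Option Int) (d : Int) : Int × Int × Int × Option Int :=
  if some d == s.2.2.2 then (s.1, s.2.1, s.2.2.1 + 1, s.2.2.2)
  else
    let f := flushB s.1 s.2.1 s.2.2.1
    (f.1, f.2, 1, some d)

def count_alt (array : List Int) (result_array : List (List Int)) : List (List Int) :=
  (List.range array.length).foldl (fun res i =>
    let ds := PySem.List.sorted
      (digitsList ((array.getD i 0).toNat + 1) (array.getD i 0) []) (fun x => x) false
    let s := ds.foldl stepB (0, 0, 0, none)
    let f := flushB s.1 s.2.1 s.2.2.1
    bump (bump (bump res i 2 (i : Int)) i 0 f.1) i 1 f.2)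
    result_array

-- ===== PRECONDITION & SPEC =====
-- Pre_count: exactly the inputs where Python A returns (it indexes result_array[i][0..2] for each i < len(array); otherwise IndexError)
def Pre_count (array : List Int) (result_array : List (List Int)) : Prop :=
  array.length ≤ result_array.length ∧
    ∀ row ∈ result_array.take array.length, 3 ≤ row.length
instance (array : List Int) (result_array : List (List Int)) : Decidable (Pre_count array result_array) := by unfold Pre_count; infer_instance

def pvWitness_count : List Int × List (List Int) := ([112, 5, 0], [[0,0,0],[1,2,3],[0,0,0]])

def Spec_count (array : List Int) (result_array : List (List Int)) (out : List (List Int)) : Prop := out = count_alt array result_array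
instance (array : List Int) (result_array : List (List Int)) (out : List (List Int)) : Decidable (Spec_count array result_array out) := by unfold Spec_count; infer_instance

-- ===== CLAIM (what is proved, stated in full; the proofs are below) =====
def Claim_equal_count : Prop := ∀ (array : List Int) (result_array : List (List Int)), Dom_count array result_array → Pre_count array result_array → Spec_count array result_array (count array result_array)

-- ===== LEMMAS AND PROOFS =====

-- list indexing / update facts
theorem getD_set {α : Type} (l : List α) (i j : Nat) (a d : α) :
    (l.set i a).getD j d = if i = j ∧ i < l.length then a else l.getD j d := by
  simp only [List.getD_eq_getElem?_getD, List.getElem?_set]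
  by_cases h1 : i = j
  · subst h1
    by_cases h2 : i < l.length
    · simp [h2]
    · simp [h2]
  · simp [h1]

theorem set_oob {α : Type} (l : List α) (i : Nat) (a : α) (h : l.length ≤ i) : l.set i a = l :=
  List.set_eq_of_length_le h

-- row arithmetic for bump
theorem row_same (row : List Int) (j : Nat) (a b : Int) :
    row.set j ((row.set j (row.getD j 0 + a)).getD j 0 + b) = row.set j (row.getD j 0 + (a + b)) := by
  by_cases hj : j < row.length
  · rw [getD_set]
    simp [hj, add_assoc]
  · have h : row.length ≤ j := by omega
    rw [set_oob row j _ h, set_oob row j _ h]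

theorem row_comm (row : List Int) {j j' : Nat} (h : j ≠ j') (a b : Int) :
    (row.set j (row.getD j 0 + a)).set j' ((row.set j (row.getD j 0 + a)).getD j' 0 + b)
      = (row.set j' (row.getD j' 0 + b)).set j ((row.set j' (row.getD j' 0 + b)).getD j 0 + a) := by
  rw [getD_set, getD_set]
  simp [h, Ne.symm h]
  exact List.set_comm _ _ h

theorem bump_bump_same (res : List (List Int)) (i j : Nat) (a b : Int) :
    bump (bump res i j a) i j b = bump res i j (a + b) := by
  unfold bump
  by_cases hi : i < res.length
  · rw [getD_set]
    simp only [hi, and_self, if_true, List.set_set]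
    exact congrArg _ (row_same _ _ _ _)
  · have h : res.length ≤ i := by omega
    simp only [List.set_eq_of_length_le h]

theorem bump_comm (res : List (List Int)) (i : Nat) {j j' : Nat} (h : j ≠ j') (a b : Int) :
    bump (bump res i j a) i j' b = bump (bump res i j' b) i j a := by
  unfold bump
  by_cases hi : i < res.length
  · rw [getD_set, getD_set]
    simp only [hi, and_self, if_true, List.set_set]
    exact congrArg _ (row_comm _ h _ _)
  · have hle : res.length ≤ i := by omega
    simp only [List.set_eq_of_length_le hle]

theorem bump_zero (res : List (List Int)) (i j : Nat) : bump res i j 0 = res := by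
  unfold bump
  by_cases hi : i < res.length
  · have hrow : res.getD i [] = res[i] := by
      rw [List.getD_eq_getElem?_getD, List.getElem?_eq_getElem hi]; rfl
    rw [hrow, add_zero]
    by_cases hj : j < (res[i]).length
    · have hset : (res[i]).set j ((res[i]).getD j 0) = res[i] := by
        rw [List.getD_eq_getElem?_getD, List.getElem?_eq_getElem hj]; simp
      rw [hset]; simp
    · rw [set_oob (res[i]) j _ (by omega)]; simp
  · rw [set_oob res i _ (by omega)]

-- A's helper 'counting' as two bumps with countP totals
theorem counting_fold (ca : List Int) (i : Nat) : ∀ (L : List Nat) (res : List (List Int)),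
    L.foldl (fun res k =>
        let res := if ca.getD k 0 == 1 then bump res i 0 1 else res
        if ca.getD k 0 > 1 then bump res i 1 1 else res) res
      = bump (bump res i 0 ((L.countP (fun k => ca.getD k 0 == 1) : Int)))
          i 1 ((L.countP (fun k => decide (1 < ca.getD k 0)) : Int)) := by
  intro L
  induction L with
  | nil => intro res; simp [bump_zero]
  | cons k L ih =>
    intro res
    simp only [List.foldl_cons, List.countP_cons]
    rw [ih]
    by_cases h1 : ca.getD k 0 == 1 <;> by_cases h2 : ca.getD k 0 > 1 <;>
      simp only [h1, h2, decide_true, decide_false, if_true, if_false] <;> push_cast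
    · rw [bump_comm _ _ (by decide : (1:Nat) ≠ 0), bump_bump_same, bump_bump_same]
      ring_nf
    · rw [bump_bump_same]
      ring_nf
    · rw [bump_comm _ _ (by decide : (1:Nat) ≠ 0), bump_bump_same]
      ring_nf
    · rfl

theorem counting_eq (res : List (List Int)) (ca : List Int) (i : Nat) :
    counting res ca i =
      bump (bump res i 0 (((List.range 10).countP (fun k => ca.getD k 0 == 1) : Int)))
        i 1 (((List.range 10).countP (fun k => decide (1 < ca.getD k 0)) : Int)) := by
  unfold counting
  exact counting_fold ca i (List.range 10) res

-- B's digit extraction: accumulator form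
theorem digitsList_append : ∀ (fuel : Nat) (n : Int) (acc : List Int),
    digitsList fuel n acc = acc ++ digitsList fuel n [] := by
  intro fuel
  induction fuel with
  | zero => intro n acc; simp [digitsList]
  | succ fuel ih =>
    intro n acc
    rw [digitsList, digitsList]
    by_cases hp : n > 0
    · simp only [hp, if_true]
      rw [ih _ (acc ++ _), ih _ ([] ++ _)]
      simp
    · simp [hp]

-- digits are in [0, 10)
theorem digitsList_mem : ∀ (fuel : Nat) (n : Int) (x : Int),
    x ∈ digitsList fuel n [] → 0 ≤ x ∧ x < 10 := by
  intro fuel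
  induction fuel with
  | zero => intro n x hx; simp [digitsList] at hx
  | succ fuel ih =>
    intro n x hx
    rw [digitsList] at hx
    by_cases hp : n > 0
    · simp only [hp, if_true, List.nil_append] at hx
      rw [digitsList_append] at hx
      rcases List.mem_append.mp hx with hx | hx
      · rw [List.mem_singleton] at hx
        subst hx
        exact ⟨PySem.Int.mod_nonneg n (by omega), PySem.Int.mod_lt n (by omega)⟩
      · exact ih _ _ hx
    · simp [hp] at hx

-- A's count array holds exactly the multiplicities of B's digit list
theorem digitsA_count : ∀ (fuel : Nat) (n : Int) (ca : List Int), ca.length = 10 →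
    ∀ k : Nat, k < 10 →
    (digitsA fuel n ca).getD k 0 = ca.getD k 0 + ((digitsList fuel n []).count ((k : Nat) : Int) : Int) := by
  intro fuel
  induction fuel with
  | zero => intro n ca _ k _; simp [digitsA, digitsList]
  | succ fuel ih =>
    intro n ca hlen k hk
    rw [digitsA, digitsList]
    by_cases hp : n > 0
    · simp only [hp, if_true, List.nil_append]
      have hd0 : 0 ≤ PySem.Int.mod n 10 := PySem.Int.mod_nonneg n (by omega)
      have hd10 : PySem.Int.mod n 10 < 10 := PySem.Int.mod_lt n (by omega)
      rw [ih _ _ (by simp [hlen]) k hk, getD_set,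
        digitsList_append fuel (PySem.Int.floordiv n 10) [PySem.Int.mod n 10],
        List.singleton_append, List.count_cons]
      by_cases he : (PySem.Int.mod n 10).toNat = k
      · subst he
        rw [if_pos ⟨rfl, by omega⟩]
        have h2 : (PySem.Int.mod n 10 == (((PySem.Int.mod n 10).toNat : Nat) : Int)) = true := by
          simp only [beq_iff_eq]
          omega
        simp only [h2, if_true]
        push_cast
        ring
      · rw [if_neg (fun hc => he hc.1)]
        have h2 : (PySem.Int.mod n 10 == ((k : Nat) : Int)) = false := by
          simp only [beq_eq_false_iff_ne, ne_eq]
          intro hco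
          exact he (by omega)
        simp only [h2, Bool.false_eq_true, if_false]
        push_cast
        ring
    · simp [hp]

-- multiplicity count over the flatMap-of-replicates normal form
theorem count_flat (c : Nat → Nat) : ∀ (ks : List Nat), ks.Nodup → ∀ a : Int,
    (ks.flatMap (fun k : Nat => List.replicate (c k) ((k : Nat) : Int))).count a
      = if a ∈ ks.map (fun k : Nat => ((k : Nat) : Int)) then c a.toNat else 0 := by
  intro ks
  induction ks with
  | nil => intro _ a; simp
  | cons k ks ih =>
    intro hnd a
    have hknotin : k ∉ ks := (List.nodup_cons.mp hnd).1
    rw [List.flatMap_cons, List.count_append, List.count_replicate,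
      ih (List.nodup_cons.mp hnd).2 a]
    simp only [List.map_cons, List.mem_cons]
    by_cases hak : a = ((k : Nat) : Int)
    · simp [hak]
      exact fun hx => absurd hx hknotin
    · simp [hak]
      exact fun hx => absurd hx.symm hak

-- the sorted digit list is the concatenation of the per-value runs
theorem sorted_blocks (l : List Int) (h : ∀ x ∈ l, 0 ≤ x ∧ x < 10) :
    PySem.List.sorted l (fun x => x) false
      = (List.range 10).flatMap (fun k : Nat => List.replicate (l.count ((k : Nat) : Int)) ((k : Nat) : Int)) := by
  apply PySem.List.sorted_id_eq_of_perm_of_pairwise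
  · rw [List.perm_iff_count]
    intro a
    rw [count_flat _ (List.range 10) List.nodup_range a]
    by_cases hmem : a ∈ (List.range 10).map (fun k : Nat => ((k : Nat) : Int))
    · simp only [List.mem_map, List.mem_range] at hmem
      obtain ⟨k, hk, he⟩ := hmem
      have hta : a.toNat = k := by omega
      rw [if_pos, hta, ← he]
      simp only [List.mem_map, List.mem_range]
      exact ⟨k, hk, he⟩
    · rw [if_neg hmem]
      by_cases hal : a ∈ l
      · exact absurd (by
          simp only [List.mem_map, List.mem_range]
          obtain ⟨h0, h10⟩ := h a hal
          exact ⟨a.toNat, by omega, by omega⟩) hmem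
      · exact (List.count_eq_zero.mpr hal).symm
  · rw [List.pairwise_flatMap]
    constructor
    · intro k _
      exact List.pairwise_replicate.mpr (Or.inr le_rfl)
    · apply List.Pairwise.imp _ (List.pairwise_lt_range (n := 10))
      intro a b hab x hx y hy
      rw [List.eq_of_mem_replicate hx, List.eq_of_mem_replicate hy]
      exact_mod_cast Nat.le_of_lt hab

-- run scan: staying inside one run
theorem scan_run_same (v : Int) : ∀ (c : Nat) (o m r : Int),
    (List.replicate c v).foldl stepB (o, m, r, some v) = (o, m, r + (c : Int), some v) := by
  intro c
  induction c with
  | zero => intro o m r; simp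
  | succ c ih =>
    intro o m r
    rw [List.replicate_succ, List.foldl_cons]
    have hstep : stepB (o, m, r, some v) v = (o, m, r + 1, some v) := by
      simp [stepB]
    rw [hstep, ih]
    push_cast
    ring_nf

-- run scan: entering a fresh run flushes the previous one
theorem scan_block (v : Int) (c : Nat) (hc : 0 < c) (o m r : Int) (p : Option Int)
    (hp : p ≠ some v) :
    (List.replicate c v).foldl stepB (o, m, r, p)
      = ((flushB o m r).1, (flushB o m r).2, (c : Int), some v) := by
  obtain ⟨c', rfl⟩ : ∃ c', c = c' + 1 := ⟨c - 1, by omega⟩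
  rw [List.replicate_succ, List.foldl_cons]
  have hstep : stepB (o, m, r, p) v = ((flushB o m r).1, (flushB o m r).2, 1, some v) := by
    have hb : ¬ ((some v == p) = true) := by
      simp only [beq_iff_eq]
      exact fun he => hp he.symm
    simp [stepB, hb]
  rw [hstep, scan_run_same]
  push_cast
  ring_nf

-- run scan over the block decomposition: final flush = (#values with count 1, #values with count > 1)
theorem scan_go (c : Nat → Nat) : ∀ (ks : List Nat), ks.Pairwise (· ≠ ·) →
    ∀ (o m r : Int) (p : Option Int), (∀ k ∈ ks, p ≠ some ((k : Nat) : Int)) →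
    flushB ((ks.flatMap (fun k : Nat => List.replicate (c k) ((k : Nat) : Int))).foldl stepB (o, m, r, p)).1
        ((ks.flatMap (fun k : Nat => List.replicate (c k) ((k : Nat) : Int))).foldl stepB (o, m, r, p)).2.1
        ((ks.flatMap (fun k : Nat => List.replicate (c k) ((k : Nat) : Int))).foldl stepB (o, m, r, p)).2.2.1
      = ((flushB o m r).1 + (ks.countP (fun k => c k == 1) : Int),
         (flushB o m r).2 + (ks.countP (fun k => decide (1 < c k)) : Int)) := by
  intro ks
  induction ks with
  | nil =>
    intro _ o m r p _
    simp
  | cons k ks ih =>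
    intro hnd o m r p hp
    have hnd' := (List.pairwise_cons.mp hnd).2
    have hkks := (List.pairwise_cons.mp hnd).1
    rw [List.flatMap_cons, List.foldl_append, List.countP_cons, List.countP_cons]
    by_cases hc : 0 < c k
    · rw [scan_block ((k : Nat) : Int) (c k) hc o m r p (hp k (List.mem_cons_self ..))]
      rw [ih hnd' (flushB o m r).1 (flushB o m r).2 ((c k : Nat) : Int) (some ((k : Nat) : Int)) (by
        intro k' hk'
        simp only [ne_eq, Option.some.injEq]
        intro hco
        exact hkks k' hk' (by omega))]
      have hflush : flushB (flushB o m r).1 (flushB o m r).2 ((c k : Nat) : Int)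
          = ((flushB o m r).1 + (if c k == 1 then 1 else 0),
             (flushB o m r).2 + (if decide (1 < c k) then 1 else 0)) := by
        unfold flushB
        by_cases h1 : c k = 1
        · simp [h1]
        · have h2 : 1 < c k := by omega
          have hb1 : (((c k : Nat) : Int) == 1) = false := by
            simp only [beq_eq_false_iff_ne, ne_eq]
            omega
          have hbn : (c k == 1) = false := by
            simp [h1]
          have hb2 : (1 : Int) < ((c k : Nat) : Int) := by exact_mod_cast h2
          simp [hb1, hbn, hb2, h2]
      rw [hflush]
      simp only [Prod.mk.injEq]
      constructor <;> push_cast <;> ring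
    · have hc0 : c k = 0 := by omega
      rw [hc0]
      simp only [List.replicate_zero, List.foldl_nil]
      rw [ih hnd' o m r p (fun k' hk' => hp k' (List.mem_cons_of_mem _ hk'))]
      simp

-- ===== VERDICT (by name: the statement is the Claim_ definition above) =====
theorem count_spec : Claim_equal_count := by
  intro array result_array _ _
  unfold Spec_count count count_alt
  apply PySem.List.foldl_congr_mem
  intro res i _
  set n := array.getD i 0 with hn
  set dl := digitsList (n.toNat + 1) n [] with hdl
  have hmem : ∀ x ∈ dl, 0 ≤ x ∧ x < 10 := digitsList_mem _ _
  have hscan := scan_go (fun k : Nat => dl.count ((k : Nat) : Int)) (List.range 10)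
    List.nodup_range 0 0 0 none (by intro k _; simp)
  have hf0 : flushB 0 0 0 = (0, 0) := by decide
  simp only [hf0] at hscan
  have hca : ∀ k : Nat, k < 10 →
      (digitsA (n.toNat + 1) n (List.replicate 10 0)).getD k 0 = ((dl.count ((k : Nat) : Int) : Nat) : Int) := by
    intro k hk
    rw [digitsA_count _ _ _ (by simp) k hk, ← hdl]
    have h0 : (List.replicate 10 (0 : Int)).getD k 0 = 0 := by
      rw [List.getD_eq_getElem?_getD, List.getElem?_replicate, if_pos hk]
      rfl
    rw [h0, zero_add]
  have hc1 : (List.range 10).countP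
      (fun k => (digitsA (n.toNat + 1) n (List.replicate 10 0)).getD k 0 == 1)
      = (List.range 10).countP (fun k : Nat => dl.count ((k : Nat) : Int) == 1) := by
    apply List.countP_congr
    intro k hk
    rw [hca k (List.mem_range.mp hk)]
    simp only [beq_iff_eq]
    omega
  have hc2 : (List.range 10).countP
      (fun k => decide (1 < (digitsA (n.toNat + 1) n (List.replicate 10 0)).getD k 0))
      = (List.range 10).countP (fun k : Nat => decide (1 < dl.count ((k : Nat) : Int))) := by
    apply List.countP_congr
    intro k hk
    rw [hca k (List.mem_range.mp hk)]
    simp only [decide_eq_true_eq]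
    omega
  rw [counting_eq, hc1, hc2]
  simp only [sorted_blocks dl hmem, hscan, zero_add]
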